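-- pv_equiv track=rewrite | github.com/gjamesli2126/leetcode | 1055. Shortest Way to Form String/main.py | shortestWay_timeMlogN
-- ===== SOURCE A (Python) =====
-- def shortestWay_timeMlogN(source: str, target: str) -> int:
--     #time cmoplex: O(MlogN)
--     pushSrcIndex = 0
--     count=0
--     maxSrc=len(source)
--     maxTar=len(target)
--     for ind,tc in enumerate(target):
--         if tc not in source:
--             return -1
--         nextSrcIndex=source[pushSrcIndex:].index(tc)+pushSrcIndex+1
--         if ind<maxTar-1 and target[ind+1] not in source[nextSrcIndex:] or nextSrcIndex<=pushSrcIndex or nextSrcIndex>=maxSrc: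
--             count += 1
--             pushSrcIndex = 0
--             continue
--         pushSrcIndex=nextSrcIndex
--     if pushSrcIndex!=0:
--         count+=1
--     return count
-- ===== SOURCE B (Python) =====
-- from bisect import bisect_left
--
-- def shortestWay_timeMlogN(source: str, target: str) -> int:
--     # Precompute char -> sorted occurrence indices; bisect for next occurrence.
--     occ = {}
--     for j, c in enumerate(source):
--         occ.setdefault(c, []).append(j)
--     wraps = 0
--     i = 0  # next source position usable in the current pass
--     for tc in target:
--         lst = occ.get(tc)
--         if lst is None:
--             return -1
--         k = bisect_left(lst, i)
--         if k == len(lst):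
--             wraps += 1
--             k = 0
--         i = lst[k] + 1
--     return wraps + (1 if target else 0)
-- ===== Notes on version B (the rewrite author's own statement) =====
-- stated objective: faster
-- what changed: A rescans and slices source for every target character (membership test, .index on a slice, lookahead membership on another slice); B precomputes one char -> sorted occurrence-index dict in a single pass over source and answers each next-occurrence query with bisect_left, counting restarts lazily instead of A's eager lookahead reset.
import Mathlib
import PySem

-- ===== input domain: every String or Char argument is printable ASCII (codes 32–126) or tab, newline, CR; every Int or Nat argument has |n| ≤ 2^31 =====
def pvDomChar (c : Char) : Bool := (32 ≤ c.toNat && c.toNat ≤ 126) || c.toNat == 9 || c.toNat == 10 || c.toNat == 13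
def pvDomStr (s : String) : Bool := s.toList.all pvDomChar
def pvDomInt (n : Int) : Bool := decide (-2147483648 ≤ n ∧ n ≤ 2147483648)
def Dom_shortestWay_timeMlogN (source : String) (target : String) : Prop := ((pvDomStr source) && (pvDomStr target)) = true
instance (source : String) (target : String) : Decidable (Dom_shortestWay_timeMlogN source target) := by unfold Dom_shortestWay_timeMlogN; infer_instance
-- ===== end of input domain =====

-- B replaces A's per-character linear scans and slices of `source` by a precomputed
-- char → sorted-occurrence-index table queried with bisect_left (objective: faster).

-- ===== PORT A =====
-- the loop of A over `target`; state (pushSrcIndex, count); early `return -1` is the -1 branch.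
-- `ind < maxTar-1 and target[ind+1] not in source[nextSrcIndex:]` is `rest.head?.any …`:
-- there is a next target character (= the head of the remaining list) and it is not in source[next:].
def pvGoA (s : List Char) : List Char → Nat → Int → Int
  | [], push, count => if push ≠ 0 then count + 1 else count   -- the trailing `if pushSrcIndex!=0`
  | tc :: rest, push, count =>
    if tc ∈ s then
      match PySem.List.index? (s.drop push) tc with
      | none => 0   -- unreachable: Python's .index would raise; the loop keeps tc findable from push
      | some j =>
        let next := j + push + 1
        if (rest.head?.any fun nc => !((s.drop next).contains nc))
            || decide (next ≤ push) || decide (s.length ≤ next)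
        then pvGoA s rest 0 (count + 1)
        else pvGoA s rest next count
    else -1

def shortestWay_timeMlogN (source : String) (target : String) : Int :=
  pvGoA source.toList target.toList 0 0

-- ===== PORT B =====
-- occ = {} ; for j, c in enumerate(source): occ.setdefault(c, []).append(j)
def pvBuildOcc (s : List Char) : PySem.Dict Char (List Int) :=
  s.zipIdx.foldl (fun d p => d.insert p.1 (d.getD p.1 [] ++ [(p.2 : Int)])) PySem.Dict.empty

-- the loop of B over `target`; state (i, wraps); `none` = the early `return -1`.
-- lst[k] / lst[0] are in range where used (k < len in that branch; lst is never empty), so getD is exact.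
def pvGoB (occ : PySem.Dict Char (List Int)) : List Char → Int → Int → Option Int
  | [], _, wraps => some wraps
  | tc :: rest, i, wraps =>
    match occ.get? tc with
    | none => none
    | some lst =>
      let k := PySem.List.bisectLeft lst i
      if k = lst.length then pvGoB occ rest (lst.getD 0 0 + 1) (wraps + 1)
      else pvGoB occ rest (lst.getD k 0 + 1) wraps

def shortestWay_timeMlogN_alt (source : String) (target : String) : Int :=
  match pvGoB (pvBuildOcc source.toList) target.toList 0 0 with
  | none => -1
  | some w => w + (if target.toList.isEmpty then 0 else 1)

-- ===== PRECONDITION & SPEC =====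
def Spec_shortestWay_timeMlogN (source : String) (target : String) (out : Int) : Prop := out = shortestWay_timeMlogN_alt source target
instance (source : String) (target : String) (out : Int) : Decidable (Spec_shortestWay_timeMlogN source target out) := by unfold Spec_shortestWay_timeMlogN; infer_instance

-- ===== CLAIM (what is proved, stated in full; the proofs are below) =====
def Claim_equal_shortestWay_timeMlogN : Prop := ∀ (source : String) (target : String), Dom_shortestWay_timeMlogN source target → Spec_shortestWay_timeMlogN source target (shortestWay_timeMlogN source target)

-- ===== LEMMAS AND PROOFS =====

-- the sorted list of occurrence indices of c in s (what pvBuildOcc stores under key c)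
def pvOccList (s : List Char) (c : Char) : List Int :=
  (s.zipIdx.filter (fun p => p.1 == c)).map (fun p => ((p.2 : Nat) : Int))

theorem pv_fold_getD (l : List (Char × Nat)) (d : PySem.Dict Char (List Int)) (c : Char) :
    (l.foldl (fun d p => d.insert p.1 (d.getD p.1 [] ++ [(p.2 : Int)])) d).getD c []
      = d.getD c [] ++ (l.filter (fun p => p.1 == c)).map (fun p => ((p.2 : Nat) : Int)) := by
  induction l generalizing d with
  | nil => simp
  | cons a l ih =>
    simp only [List.foldl_cons, ih, List.filter_cons]
    by_cases h : a.1 = c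
    · subst h
      simp [PySem.Dict.getD_insert_self]
    · simp [PySem.Dict.getD_insert, h, Ne.symm h]

theorem pv_fold_contains (l : List (Char × Nat)) (d : PySem.Dict Char (List Int)) (c : Char) :
    (l.foldl (fun d p => d.insert p.1 (d.getD p.1 [] ++ [(p.2 : Int)])) d).contains c
      = (d.contains c || l.any (fun p => p.1 == c)) := by
  induction l generalizing d with
  | nil => simp
  | cons a l ih =>
    simp only [List.foldl_cons, ih, List.any_cons, PySem.Dict.contains_insert]
    by_cases h : a.1 = c
    · simp [h]
    · have : (c == a.1) = false := by simp [Ne.symm h]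
      have h2 : (a.1 == c) = false := by simp [h]
      simp [this, h2]

theorem pv_occ_contains (s : List Char) (c : Char) :
    (pvBuildOcc s).contains c = decide (c ∈ s) := by
  rw [pvBuildOcc, pv_fold_contains, PySem.Dict.contains_empty]
  simp only [Bool.false_or]
  rcases Bool.eq_false_or_eq_true (s.zipIdx.any fun p => p.1 == c) with h | h <;> rw [h]
  · simp only [List.any_eq_true] at h
    obtain ⟨p, hp, he⟩ := h
    have : p.1 ∈ s := by
      have := List.mem_zipIdx (x := p.1) (i := p.2) (xs := s) (k := 0) (by simpa using hp)
      simp only [Nat.zero_add, Nat.sub_zero] at this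
      exact this.2.2 ▸ List.getElem_mem _
    simp_all
  · simp only [List.any_eq_false] at h
    have : c ∉ s := by
      intro hc
      obtain ⟨n, hn, he⟩ := List.mem_iff_getElem.mp hc
      have hmem : (s[n], n) ∈ s.zipIdx := by
        rw [List.mk_mem_zipIdx_iff_getElem?]; exact List.getElem?_eq_getElem hn
      exact h (s[n], n) hmem (by simp [he])
    simp [this]

theorem pv_occ_get (s : List Char) (c : Char) :
    (pvBuildOcc s).get? c = if c ∈ s then some (pvOccList s c) else none := by
  by_cases hc : c ∈ s
  · have h1 : (pvBuildOcc s).contains c = true := by simp [pv_occ_contains, hc]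
    rw [PySem.Dict.contains_eq_isSome_get?] at h1
    obtain ⟨v, hv⟩ := Option.isSome_iff_exists.mp h1
    have h2 : (pvBuildOcc s).getD c [] = pvOccList s c := by
      rw [pvBuildOcc, pv_fold_getD, PySem.Dict.getD_empty, List.nil_append, pvOccList]
    rw [PySem.Dict.getD_eq_get?_getD, hv, Option.getD_some] at h2
    rw [hv, if_pos hc, h2]
  · have h1 : (pvBuildOcc s).contains c = false := by simp [pv_occ_contains, hc]
    rw [if_neg hc, (PySem.Dict.get?_eq_none_iff_contains _ _).mpr h1]

theorem pv_occ_mem (s : List Char) (c : Char) (x : Int) :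
    x ∈ pvOccList s c ↔ ∃ n : Nat, x = (n : Int) ∧ ∃ h : n < s.length, s[n] = c := by
  simp only [pvOccList, List.mem_map, List.mem_filter]
  constructor
  · rintro ⟨⟨a, n⟩, ⟨hmem, hbeq⟩, rfl⟩
    rw [List.mk_mem_zipIdx_iff_getElem?] at hmem
    obtain ⟨hlt, he⟩ := List.getElem?_eq_some_iff.mp hmem
    exact ⟨n, rfl, hlt, by simp_all⟩
  · rintro ⟨n, rfl, hlt, he⟩
    exact ⟨(c, n), ⟨by rw [List.mk_mem_zipIdx_iff_getElem?, List.getElem?_eq_some_iff]; exact ⟨hlt, he⟩, by simp⟩, rfl⟩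

theorem pv_occ_sorted (s : List Char) (c : Char) :
    (pvOccList s c).Pairwise (· ≤ ·) := by
  rw [pvOccList]
  have hpw : (s.zipIdx.filter (fun p => p.1 == c)).Pairwise
      (fun p q : Char × Nat => ((p.2 : Nat) : Int) ≤ ((q.2 : Nat) : Int)) := by
    apply List.Pairwise.sublist List.filter_sublist
    rw [List.pairwise_iff_getElem]
    intro a b ha hb hab
    simp only [List.getElem_zipIdx]
    simp only [List.length_zipIdx] at ha hb
    omega
  exact List.pairwise_map.mpr hpw

theorem pv_mem_drop (s : List Char) (p : Nat) (c : Char) :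
    c ∈ s.drop p ↔ ∃ n, p ≤ n ∧ ∃ h : n < s.length, s[n] = c := by
  rw [List.mem_iff_getElem]
  constructor
  · rintro ⟨m, hm, he⟩
    rw [List.getElem_drop] at he
    rw [List.length_drop] at hm
    exact ⟨p + m, by omega, by omega, he⟩
  · rintro ⟨n, hpn, hn, he⟩
    refine ⟨n - p, by rw [List.length_drop]; omega, ?_⟩
    rw [List.getElem_drop]
    have : p + (n - p) = n := by omega
    simp_rw [this]
    exact he

theorem pv_bisect_none (s : List Char) (c : Char) (p : Nat) (h : c ∉ s.drop p) :
    PySem.List.bisectLeft (pvOccList s c) (p : Int) = (pvOccList s c).length := by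
  obtain ⟨hle, hlo, hhi⟩ := PySem.List.bisectLeft_spec (pvOccList s c) (p : Int) (pv_occ_sorted s c)
  set lst := pvOccList s c with hlst
  set k := PySem.List.bisectLeft lst (p : Int) with hk
  by_contra hne
  have hklt : k < lst.length := lt_of_le_of_ne hle hne
  have hmem : lst[k] ∈ lst := List.getElem_mem _
  obtain ⟨n, hxn, hn, he⟩ := (pv_occ_mem s c _).mp hmem
  have hge : (p : Int) ≤ lst[k] := hhi k hklt le_rfl
  exact h ((pv_mem_drop s p c).mpr ⟨n, by omega, hn, he⟩)

theorem pv_bisect_found (s : List Char) (c : Char) (p j : Nat)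
    (h : PySem.List.index? (s.drop p) c = some j) :
    PySem.List.bisectLeft (pvOccList s c) (p : Int) < (pvOccList s c).length ∧
      (pvOccList s c).getD (PySem.List.bisectLeft (pvOccList s c) (p : Int)) 0 = ((p + j : Nat) : Int) := by
  obtain ⟨hle, hlo, hhi⟩ := PySem.List.bisectLeft_spec (pvOccList s c) (p : Int) (pv_occ_sorted s c)
  set lst := pvOccList s c with hlst
  set k := PySem.List.bisectLeft lst (p : Int) with hk
  obtain ⟨hj, hje, hjmin⟩ := PySem.List.getElem_of_index?_eq_some h
  rw [List.getElem_drop] at hje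
  have hjlen : p + j < s.length := by rw [List.length_drop] at hj; omega
  -- p+j is in lst, at some position q
  have hpj : ((p + j : Nat) : Int) ∈ lst := (pv_occ_mem s c _).mpr ⟨p + j, rfl, hjlen, hje⟩
  obtain ⟨q, hq, hqe⟩ := List.mem_iff_getElem.mp hpj
  -- k ≤ q, since lst[q] = p+j ≥ p
  have hkq : k ≤ q := by
    by_contra hlt
    have := hlo q hq (by omega)
    rw [hqe] at this
    omega
  have hklt : k < lst.length := lt_of_le_of_lt hkq hq
  -- lst[k] between p and p+j
  have h1 : (p : Int) ≤ lst[k] := hhi k hklt le_rfl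
  have h2 : lst[k] ≤ ((p + j : Nat) : Int) := by
    rcases Nat.eq_or_lt_of_le hkq with heq | hlt
    · simp [heq, hqe]
    · have := List.pairwise_iff_getElem.mp (pv_occ_sorted s c) k q hklt hq hlt
      rw [hqe] at this
      exact this
  -- lst[k] is an occurrence; minimality of j forces lst[k] = p+j
  obtain ⟨n, hxn, hn, he⟩ := (pv_occ_mem s c _).mp (List.getElem_mem hklt)
  have hnp : p ≤ n := by omega
  have hnpj : n ≤ p + j := by omega
  have hnej : n = p + j := by
    by_contra hne
    have hm : n - p < j := by omega
    apply hjmin (n - p) hm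
    rw [List.getElem_drop]
    have hpn : p + (n - p) = n := by omega
    simp only [hpn]
    exact he
  refine ⟨hklt, ?_⟩
  rw [List.getD_eq_getElem _ _ hklt]
  omega

theorem pv_bisect_zero (s : List Char) (c : Char) :
    PySem.List.bisectLeft (pvOccList s c) 0 = 0 := by
  obtain ⟨hle, hlo, hhi⟩ := PySem.List.bisectLeft_spec (pvOccList s c) 0 (pv_occ_sorted s c)
  set k := PySem.List.bisectLeft (pvOccList s c) 0 with hk
  by_contra hne
  have h0 : 0 < k := Nat.pos_of_ne_zero hne
  have hlen : 0 < (pvOccList s c).length := by omega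
  have := hlo 0 hlen h0
  obtain ⟨n, hxn, hn, he⟩ := (pv_occ_mem s c _).mp (List.getElem_mem hlen)
  omega

theorem pvGoA_cons_notmem (s : List Char) (tc : Char) (rest : List Char) (push : Nat)
    (count : Int) (htc : tc ∉ s) : pvGoA s (tc :: rest) push count = -1 := by
  simp only [pvGoA, if_neg htc]

theorem pvGoA_cons_found (s : List Char) (tc : Char) (rest : List Char) (push : Nat)
    (count : Int) (j : Nat) (htc : tc ∈ s)
    (hj : PySem.List.index? (s.drop push) tc = some j) :
    pvGoA s (tc :: rest) push count =
      if (rest.head?.any fun nc => !((s.drop (j + push + 1)).contains nc))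
          || decide (j + push + 1 ≤ push) || decide (s.length ≤ j + push + 1)
      then pvGoA s rest 0 (count + 1)
      else pvGoA s rest (j + push + 1) count := by
  simp only [pvGoA, if_pos htc, hj]

theorem pvGoB_cons_none (occ : PySem.Dict Char (List Int)) (tc : Char) (rest : List Char)
    (i wraps : Int) (h : occ.get? tc = none) : pvGoB occ (tc :: rest) i wraps = none := by
  simp only [pvGoB, h]

theorem pvGoB_cons_some (occ : PySem.Dict Char (List Int)) (tc : Char) (rest : List Char)
    (i wraps : Int) (lst : List Int) (h : occ.get? tc = some lst) :
    pvGoB occ (tc :: rest) i wraps =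
      if PySem.List.bisectLeft lst i = lst.length
      then pvGoB occ rest (lst.getD 0 0 + 1) (wraps + 1)
      else pvGoB occ rest (lst.getD (PySem.List.bisectLeft lst i) 0 + 1) wraps := by
  simp only [pvGoB, h]

theorem pv_main (s : List Char) (rest : List Char) :
    ∀ (push : Nat) (count : Int) (i : Int) (wraps : Int),
    ( (i = (push : Int) ∧ wraps = count ∧ (push ≠ 0 → ∀ nc, rest.head? = some nc → nc ∈ s.drop push)
        ∧ (push = 0 → rest ≠ []))
      ∨ (push = 0 ∧ 1 ≤ i ∧ wraps = count - 1 ∧ (∀ nc, rest.head? = some nc → nc ∉ s.drop i.toNat)) )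
    → pvGoA s rest push count = (pvGoB (pvBuildOcc s) rest i wraps).elim (-1) (· + 1) := by
  induction rest with
  | nil =>
    intro push count i wraps inv
    rcases inv with ⟨hi, hw, _, hnz⟩ | ⟨hp0, _, hw, _⟩
    · have hp : push ≠ 0 := fun h => (hnz h) rfl
      simp [pvGoA, pvGoB, hp, hw]
    · simp only [pvGoA, pvGoB, hp0, Option.elim_some]
      simp
      omega
  | cons tc rest ih =>
    intro push count i wraps inv
    by_cases htc : tc ∈ s
    case neg =>
      have hocc : (pvBuildOcc s).get? tc = none := by rw [pv_occ_get, if_neg htc]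
      rw [pvGoA_cons_notmem s tc rest push count htc, pvGoB_cons_none _ tc rest i wraps hocc]
      rfl
    case pos =>
    have hocc : (pvBuildOcc s).get? tc = some (pvOccList s tc) := by rw [pv_occ_get, if_pos htc]
    rcases inv with ⟨hi, hw, hfind, _⟩ | ⟨hp0, hi1, hw, hnot⟩
    · -- C1: i = push, wraps = count, tc findable from push
      have hmem : tc ∈ s.drop push := by
        by_cases hp0 : push = 0
        · simpa [hp0] using htc
        · exact hfind hp0 tc rfl
      obtain ⟨j, hj⟩ := Option.isSome_iff_exists.mp ((PySem.List.index?_isSome_iff _ tc).mpr hmem)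
      obtain ⟨hkl, hkd⟩ := pv_bisect_found s tc push j hj
      -- unfold one step
      rw [pvGoA_cons_found s tc rest push count j htc hj]
      rw [hi, pvGoB_cons_some _ tc rest _ wraps _ hocc, if_neg (Nat.ne_of_lt hkl), hkd]
      by_cases hcond : ((rest.head?.any fun nc => !((s.drop (j + push + 1)).contains nc))
                || decide (j + push + 1 ≤ push) || decide (s.length ≤ j + push + 1)) = true
      · rw [if_pos hcond]
        apply ih
        right
        refine ⟨rfl, by push_cast; omega, by omega, ?_⟩
        intro nc hnc
        have htn : (((push + j : Nat) : Int) + 1).toNat = j + push + 1 := by omega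
        rw [htn]
        -- from hcond: first or third disjunct
        rcases Bool.or_eq_true_iff.mp hcond with hor | h3
        · rcases Bool.or_eq_true_iff.mp hor with h1 | h2
          · rw [hnc] at h1
            simpa using h1
          · rw [decide_eq_true_iff] at h2; omega
        · have : s.length ≤ j + push + 1 := by simpa using h3
          simp [List.drop_eq_nil_of_le this]
      · rw [if_neg hcond]
        apply ih
        left
        refine ⟨by push_cast; omega, hw, ?_, by omega⟩
        intro _ nc hnc
        simp only [Bool.or_eq_true, not_or] at hcond
        obtain ⟨⟨h1, _⟩, _⟩ := hcond
        rw [hnc] at h1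
        simpa using h1
    · -- C2: push = 0, i ≥ 1, wraps = count - 1, tc not findable from i
      subst hp0
      have hdrop0 : s.drop 0 = s := by simp
      obtain ⟨j, hj⟩ := Option.isSome_iff_exists.mp
        ((PySem.List.index?_isSome_iff (s.drop 0) tc).mpr (by rw [hdrop0]; exact htc))
      obtain ⟨hkl, hkd⟩ := pv_bisect_found s tc 0 j hj
      have hkd0 : (pvOccList s tc).getD 0 0 + 1 = ((0 + j : Nat) : Int) + 1 := by
        rw [← hkd]
        norm_num [pv_bisect_zero]
      have hnone : PySem.List.bisectLeft (pvOccList s tc) i = (pvOccList s tc).length := by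
        have := pv_bisect_none s tc i.toNat (hnot tc rfl)
        rwa [Int.toNat_of_nonneg (by omega)] at this
      rw [pvGoA_cons_found s tc rest 0 count j htc hj]
      rw [pvGoB_cons_some _ tc rest _ wraps _ hocc, if_pos hnone, hkd0]
      by_cases hcond : ((rest.head?.any fun nc => !((s.drop (j + 0 + 1)).contains nc))
                || decide (j + 0 + 1 ≤ 0) || decide (s.length ≤ j + 0 + 1)) = true
      · rw [if_pos hcond]
        apply ih
        right
        refine ⟨rfl, by push_cast; omega, by omega, ?_⟩
        intro nc hnc
        have htn : (((0 + j : Nat) : Int) + 1).toNat = j + 0 + 1 := by omega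
        rw [htn]
        rcases Bool.or_eq_true_iff.mp hcond with hor | h3
        · rcases Bool.or_eq_true_iff.mp hor with h1 | h2
          · rw [hnc] at h1
            simpa using h1
          · rw [decide_eq_true_iff] at h2; omega
        · have : s.length ≤ j + 0 + 1 := by simpa using h3
          simp [List.drop_eq_nil_of_le this]
      · rw [if_neg hcond]
        apply ih
        left
        refine ⟨by push_cast; omega, by omega, ?_, by omega⟩
        intro _ nc hnc
        simp only [Bool.or_eq_true, not_or] at hcond
        obtain ⟨⟨h1, _⟩, _⟩ := hcond
        rw [hnc] at h1
        simpa using h1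

-- ===== VERDICT (by name: the statement is the Claim_ definition above) =====
theorem shortestWay_timeMlogN_spec : Claim_equal_shortestWay_timeMlogN := by
  intro source target _
  unfold Spec_shortestWay_timeMlogN shortestWay_timeMlogN shortestWay_timeMlogN_alt
  cases ht : target.toList with
  | nil => simp [pvGoA, pvGoB]
  | cons tc rest =>
    have h := pv_main source.toList (tc :: rest) 0 0 0 0
      (Or.inl ⟨by simp, rfl, by simp, by simp⟩)
    rw [h]
    cases hb : pvGoB (pvBuildOcc source.toList) (tc :: rest) 0 0 <;> simp
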